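-- pv_equiv track=rewrite | github.com/RolnickLab/SatBird | src/trainer/multires_trainer.py | get_nb_bands
-- ===== SOURCE A (Python) =====
-- def get_nb_bands(bands):
--     n = 0
--     for b in bands:
--         if b in ["r","g","b","nir", "landuse"]:
--             n+=1
--         elif b == "ped":
--             n+=8
--         elif b == "bioclim":
--             n+= 19
--         elif b == "rgb":
--             n+=3
--     return(n)
-- ===== SOURCE B (Python) =====
-- from collections import Counter
--
-- WEIGHTS = {"r": 1, "g": 1, "b": 1, "nir": 1, "landuse": 1,
--            "ped": 8, "bioclim": 19, "rgb": 3}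
--
-- def get_nb_bands(bands):
--     counts = Counter(bands)
--     return sum(w * counts.get(t, 0) for t, w in WEIGHTS.items())
-- ===== Notes on version B (the rewrite author's own statement) =====
-- stated objective: idiomatic
-- what changed: Replaces the inline if-chain accumulation over bands with a count-then-combine decomposition: a Counter built in one pass, then a weighted sum over the fixed weight table.
import Mathlib
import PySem

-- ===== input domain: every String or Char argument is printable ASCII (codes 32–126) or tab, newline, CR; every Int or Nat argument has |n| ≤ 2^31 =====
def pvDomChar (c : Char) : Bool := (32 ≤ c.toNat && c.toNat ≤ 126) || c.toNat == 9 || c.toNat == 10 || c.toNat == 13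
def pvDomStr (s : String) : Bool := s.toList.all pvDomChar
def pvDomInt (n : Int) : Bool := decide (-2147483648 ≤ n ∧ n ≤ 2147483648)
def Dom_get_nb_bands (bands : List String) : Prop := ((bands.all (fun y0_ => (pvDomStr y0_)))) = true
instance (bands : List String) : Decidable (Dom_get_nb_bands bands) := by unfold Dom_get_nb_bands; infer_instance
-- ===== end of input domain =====

-- B replaces A's inline if-chain accumulation over the bands with a count-then-combine
-- decomposition: a Counter built in one pass, then a weighted sum over a fixed weight table.

-- ===== PORT A =====
def get_nb_bands (bands : List String) : Int :=
  bands.foldl (fun n b =>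
    if b ∈ ["r", "g", "b", "nir", "landuse"] then n + 1
    else if b = "ped" then n + 8
    else if b = "bioclim" then n + 19
    else if b = "rgb" then n + 3
    else n) 0

-- ===== PORT B =====
def pvWeights : List (String × Int) :=
  [("r", 1), ("g", 1), ("b", 1), ("nir", 1), ("landuse", 1),
   ("ped", 8), ("bioclim", 19), ("rgb", 3)]

def get_nb_bands_alt (bands : List String) : Int :=
  let counts := PySem.Dict.counter bands
  pvWeights.foldl (fun s tw => s + tw.2 * counts.getD tw.1 0) 0

-- ===== PRECONDITION & SPEC =====
def Spec_get_nb_bands (bands : List String) (out : Int) : Prop := out = get_nb_bands_alt bands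
instance (bands : List String) (out : Int) : Decidable (Spec_get_nb_bands bands out) := by unfold Spec_get_nb_bands; infer_instance

-- ===== CLAIM (what is proved, stated in full; the proofs are below) =====
def Claim_equal_get_nb_bands : Prop := ∀ (bands : List String), Dom_get_nb_bands bands → Spec_get_nb_bands bands (get_nb_bands bands)

-- ===== LEMMAS AND PROOFS =====

-- the weighted-count closed form both ports reduce to
def pvF (l : List String) : Int :=
  (l.count "r" : Int) + l.count "g" + l.count "b" + l.count "nir" + l.count "landuse"
    + 8 * l.count "ped" + 19 * l.count "bioclim" + 3 * l.count "rgb"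

lemma pvA_loop (l : List String) (n : Int) :
    l.foldl (fun n b =>
      if b ∈ ["r", "g", "b", "nir", "landuse"] then n + 1
      else if b = "ped" then n + 8
      else if b = "bioclim" then n + 19
      else if b = "rgb" then n + 3
      else n) n = n + pvF l := by
  induction l generalizing n with
  | nil => simp [pvF]
  | cons x l ih =>
      simp only [List.foldl_cons, ih]
      by_cases h1 : x ∈ ["r", "g", "b", "nir", "landuse"]
      · simp only [List.mem_cons, List.not_mem_nil, or_false] at h1
        rcases h1 with h | h | h | h | h <;> subst h <;> simp [pvF] <;> ring
      · by_cases h2 : x = "ped"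
        · subst h2; simp [pvF]; ring
        · by_cases h3 : x = "bioclim"
          · subst h3; simp [pvF]; ring
          · by_cases h4 : x = "rgb"
            · subst h4; simp [pvF]; ring
            · have h1' : ¬x = "r" ∧ ¬x = "g" ∧ ¬x = "b" ∧ ¬x = "nir" ∧ ¬x = "landuse" := by
                simpa [List.mem_cons, not_or] using h1
              have hb : ∀ s : String, x ≠ s → (x == s) = false :=
                fun s hs => beq_eq_false_iff_ne.mpr hs
              simp only [if_neg h1, if_neg h2, if_neg h3, if_neg h4, pvF, List.count_cons,
                hb _ h1'.1, hb _ h1'.2.1, hb _ h1'.2.2.1, hb _ h1'.2.2.2.1, hb _ h1'.2.2.2.2,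
                hb _ h2, hb _ h3, hb _ h4, Bool.false_eq_true, if_false, Nat.add_zero]

lemma pvB_closed (bands : List String) : get_nb_bands_alt bands = pvF bands := by
  simp only [get_nb_bands_alt, pvWeights, List.foldl_cons, List.foldl_nil,
    PySem.Dict.getD_counter, pvF]
  ring

-- ===== VERDICT (by name: the statement is the Claim_ definition above) =====
theorem get_nb_bands_spec : Claim_equal_get_nb_bands := by
  intro bands _
  unfold Spec_get_nb_bands get_nb_bands
  rw [pvA_loop, pvB_closed]
  simp
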